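-- pv_equiv track=rewrite | github.com/greengreengreen/data_structure_n_algos | next_greater/next_greater.py | v3_adv
-- ===== SOURCE A (Python) =====
-- def v3_adv(A):
--     n = len(A)
--     res = [-1] * n
--     arr = []
--     for i in range(n-1, -1, -1):
--         l, r = 0, len(arr)
--         while l < r:
--             m = l + (r-l)//2
--             if A[arr[m]] <= A[i]: l = m + 1
--             else: r = m
--         if l < len(arr): res[i] = arr[l]
--         if (not arr) or (A[arr[-1]] < A[i]):
--             arr.append(i)
--     return res
-- ===== SOURCE B (Python) =====
-- def v3_adv(A):
--     # rightmost index j > i with A[j] > A[i], else -1, for each i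
--     n = len(A)
--     return [next((j for j in range(n - 1, i, -1) if A[j] > A[i]), -1)
--             for i in range(n)]
-- ===== Notes on version B (the rewrite author's own statement) =====
-- stated objective: simpler
-- what changed: Replaced A's right-to-left maintenance of a monotonic record-index list with binary search by a direct per-index right-to-left scan that returns the first (rightmost) index j > i with A[j] > A[i].
import Mathlib
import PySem

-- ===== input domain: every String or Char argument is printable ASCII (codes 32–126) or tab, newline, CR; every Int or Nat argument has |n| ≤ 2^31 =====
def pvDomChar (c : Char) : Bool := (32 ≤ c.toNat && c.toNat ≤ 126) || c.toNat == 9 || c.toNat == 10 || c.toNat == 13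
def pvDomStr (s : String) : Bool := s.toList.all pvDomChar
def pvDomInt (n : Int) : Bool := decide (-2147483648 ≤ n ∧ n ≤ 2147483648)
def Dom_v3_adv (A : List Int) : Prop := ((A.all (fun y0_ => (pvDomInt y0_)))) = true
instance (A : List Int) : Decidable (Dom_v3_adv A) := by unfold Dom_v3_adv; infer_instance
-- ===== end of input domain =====

-- B replaces A's right-to-left record list + binary search by a direct per-index
-- right-to-left scan for the rightmost strictly greater element (simpler, no auxiliary structure).

-- ===== PORT A =====
-- the 'while l < r' binary search; every list access A makes is in range whenever A calls it
-- (arr holds indices < A.length and m < r ≤ arr.length), so getD is exact there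
def pvBisect (A : List Int) (arr : List Nat) (x : Int) (l r : Nat) : Nat :=
  if l < r then
    let m := l + (r - l) / 2
    if A.getD (arr.getD m 0) 0 ≤ x then pvBisect A arr x (m + 1) r
    else pvBisect A arr x l m
  else l
termination_by r - l
decreasing_by all_goals omega

-- one iteration of A's 'for i in range(n-1, -1, -1)' body, state = (res, arr)
def pvStep (A : List Int) (i : Nat) (st : List Int × List Nat) : List Int × List Nat :=
  let l := pvBisect A st.2 (A.getD i 0) 0 st.2.length
  let res := if l < st.2.length then st.1.set i ((st.2.getD l 0 : Nat) : Int) else st.1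
  let arr := if st.2 = [] ∨ A.getD (st.2.getLastD 0) 0 < A.getD i 0 then st.2 ++ [i] else st.2
  (res, arr)

-- the loop, processing indices k-1, k-2, …, 0
def pvLoop (A : List Int) : Nat → List Int × List Nat → List Int × List Nat
  | 0, st => st
  | k + 1, st => pvLoop A k (pvStep A k st)

def v3_adv (A : List Int) : List Int :=
  (pvLoop A A.length (List.replicate A.length (-1), [])).1

-- ===== PORT B =====
-- B's inner generator: scan j = jb-1, jb-2, …, i+1; first j with A[j] > x, else -1
def pvFindR (A : List Int) (x : Int) (i : Nat) : Nat → Int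
  | 0 => -1
  | j + 1 => if j ≤ i then -1 else if x < A.getD j 0 then (j : Int) else pvFindR A x i j

def v3_adv_alt (A : List Int) : List Int :=
  (List.range A.length).map (fun i => pvFindR A (A.getD i 0) i A.length)

-- ===== PRECONDITION & SPEC =====
def Spec_v3_adv (A : List Int) (out : List Int) : Prop := out = v3_adv_alt A
instance (A : List Int) (out : List Int) : Decidable (Spec_v3_adv A out) := by unfold Spec_v3_adv; infer_instance

-- ===== CLAIM (what is proved, stated in full; the proofs are below) =====
def Claim_equal_v3_adv : Prop := ∀ (A : List Int), Dom_v3_adv A → Spec_v3_adv A (v3_adv A)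

-- ===== LEMMAS AND PROOFS =====

-- j is a "suffix record": strictly greater than every element to its right
def IsRec (A : List Int) (j : Nat) : Prop :=
  j < A.length ∧ ∀ t, j < t → t < A.length → A.getD t 0 < A.getD j 0

-- invariant on A's arr when about to process index k-1: arr is exactly the set of records
-- of the suffix starting at k, with strictly decreasing indices along the list
def RecInv (A : List Int) (k : Nat) (arr : List Nat) : Prop :=
  List.Pairwise (fun a b => b < a) arr ∧
  ∀ j, j ∈ arr ↔ (k ≤ j ∧ IsRec A j)

-- above any position there is a record with a value at least as large
theorem rec_above (A : List Int) : ∀ t, t < A.length →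
    ∃ j, t ≤ j ∧ IsRec A j ∧ A.getD t 0 ≤ A.getD j 0 := by
  intro t ht
  by_cases h : IsRec A t
  · exact ⟨t, le_refl _, h, le_refl _⟩
  · have hex : ∃ u, t < u ∧ u < A.length ∧ A.getD t 0 ≤ A.getD u 0 := by
      unfold IsRec at h
      push Not at h
      obtain ⟨u, hu1, hu2, hu3⟩ := h ht
      exact ⟨u, hu1, hu2, hu3⟩
    obtain ⟨u, hu1, hu2, hu3⟩ := hex
    obtain ⟨j, hj1, hj2, hj3⟩ := rec_above A u hu2
    exact ⟨j, le_trans (le_of_lt hu1) hj1, hj2, le_trans hu3 hj3⟩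
termination_by t => A.length - t
decreasing_by omega

-- values along arr are (strictly, hence weakly) increasing with position
theorem inv_mono (A : List Int) (k : Nat) (arr : List Nat) (hinv : RecInv A k arr) :
    ∀ p q, p ≤ q → q < arr.length →
      A.getD (arr.getD p 0) 0 ≤ A.getD (arr.getD q 0) 0 := by
  intro p q hpq hq
  rcases Nat.eq_or_lt_of_le hpq with h | h
  · subst h; exact le_refl _
  · have hp : p < arr.length := lt_trans h hq
    have hrel : arr[q] < arr[p] := (List.pairwise_iff_getElem.mp hinv.1) p q hp hq h
    have hmemq : arr[q] ∈ arr := List.getElem_mem _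
    have hmemp : arr[p] ∈ arr := List.getElem_mem _
    have hrq := ((hinv.2 arr[q]).mp hmemq).2
    have hrp := ((hinv.2 arr[p]).mp hmemp).2
    have := hrq.2 arr[p] hrel hrp.1
    rw [List.getD_eq_getElem _ _ hp, List.getD_eq_getElem _ _ hq]
    exact le_of_lt this

-- an element of arr larger (as index) than arr[l] sits at a position before l
theorem pos_lt (A : List Int) (k : Nat) (arr : List Nat) (hinv : RecInv A k arr)
    (p l : Nat) (hp : p < arr.length) (hl : l < arr.length) (h : arr[l] < arr[p]) :
    p < l := by
  by_contra hc
  push Not at hc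
  rcases Nat.eq_or_lt_of_le hc with h' | h'
  · subst h'; omega
  · have := (List.pairwise_iff_getElem.mp hinv.1) l p hl hp h'
    omega

-- what the binary search returns: positions below are ≤ x, positions from it on are > x
theorem bisect_spec (A : List Int) (arr : List Nat) (x : Int)
    (mono : ∀ p q, p ≤ q → q < arr.length →
      A.getD (arr.getD p 0) 0 ≤ A.getD (arr.getD q 0) 0)
    (l r : Nat) (hlr : l ≤ r) (hr : r ≤ arr.length)
    (hlow : ∀ m, m < l → A.getD (arr.getD m 0) 0 ≤ x)
    (hhigh : ∀ m, r ≤ m → m < arr.length → x < A.getD (arr.getD m 0) 0) :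
    (∀ m, m < pvBisect A arr x l r → A.getD (arr.getD m 0) 0 ≤ x) ∧
    (∀ m, pvBisect A arr x l r ≤ m → m < arr.length → x < A.getD (arr.getD m 0) 0) ∧
    pvBisect A arr x l r ≤ arr.length := by
  rw [pvBisect]
  by_cases h : l < r
  · simp only [if_pos h]
    by_cases hc : A.getD (arr.getD (l + (r - l) / 2) 0) 0 ≤ x
    · simp only [if_pos hc]
      refine bisect_spec A arr x mono (l + (r - l) / 2 + 1) r (by omega) hr ?_ hhigh
      intro m hm
      by_cases hml : m < l
      · exact hlow m hml
      · exact le_trans (mono m (l + (r - l) / 2) (by omega) (by omega)) hc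
    · simp only [if_neg hc]
      refine bisect_spec A arr x mono l (l + (r - l) / 2) (by omega) (by omega) hlow ?_
      intro m hm1 hm2
      push Not at hc
      exact lt_of_lt_of_le hc (mono (l + (r - l) / 2) m hm1 hm2)
  · simp only [if_neg h]
    have hle : l = r := by omega
    subst hle
    exact ⟨hlow, hhigh, hr⟩
termination_by r - l
decreasing_by all_goals omega

-- B's scan returns -1 exactly when nothing after i up to jb exceeds x
theorem findR_none (A : List Int) (x : Int) (i : Nat) :
    ∀ jb, (∀ t, i < t → t < jb → A.getD t 0 ≤ x) → pvFindR A x i jb = -1 := by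
  intro jb
  induction jb with
  | zero => intro _; rfl
  | succ j ih =>
    intro h
    rw [pvFindR]
    by_cases hji : j ≤ i
    · rw [if_pos hji]
    · have hx : A.getD j 0 ≤ x := h j (by omega) (by omega)
      have hnx : ¬ x < A.getD j 0 := by omega
      rw [if_neg hji, if_neg hnx]
      exact ih (fun t h1 h2 => h t h1 (by omega))

-- B's scan returns t when t is the rightmost exceeding position below jb
theorem findR_found (A : List Int) (x : Int) (i : Nat) :
    ∀ jb t, i < t → t < jb → x < A.getD t 0 →
      (∀ t', t < t' → t' < jb → A.getD t' 0 ≤ x) → pvFindR A x i jb = (t : Int) := by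
  intro jb
  induction jb with
  | zero => intro t _ h2 _ _; omega
  | succ j ih =>
    intro t h1 h2 h3 h4
    rw [pvFindR]
    have hji : ¬ j ≤ i := by omega
    by_cases hjt : t = j
    · subst hjt; rw [if_neg hji, if_pos h3]
    · have hx : A.getD j 0 ≤ x := h4 j (by omega) (by omega)
      have hnx : ¬ x < A.getD j 0 := by omega
      rw [if_neg hji, if_neg hnx]
      exact ih t h1 (by omega) h3 (fun t' a b => h4 t' a (by omega))

-- the getLastD of a nonempty list is its last element
theorem getLastD_eq (arr : List Nat) (_h : arr ≠ []) :
    arr.getLastD 0 = arr.getD (arr.length - 1) 0 := by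
  rw [List.getLastD_eq_getLast?, List.getLast?_eq_getElem?, List.getD_eq_getElem?_getD]

-- the result recorded for index i by A's step equals B's scan value at i
theorem step_res (A : List Int) (i : Nat) (arr : List Nat)
    (_hi : i < A.length) (hinv : RecInv A (i + 1) arr) :
    (if pvBisect A arr (A.getD i 0) 0 arr.length < arr.length
      then ((arr.getD (pvBisect A arr (A.getD i 0) 0 arr.length) 0 : Nat) : Int)
      else -1)
    = pvFindR A (A.getD i 0) i A.length := by
  set x := A.getD i 0 with hx
  set l := pvBisect A arr x 0 arr.length with hldef
  obtain ⟨hlow, hhigh, hlen⟩ := bisect_spec A arr x (inv_mono A (i + 1) arr hinv)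
    0 arr.length (by omega) (le_refl _) (by omega) (by omega)
  -- any index above an arr position ≤-bounded set is itself ≤ x when all relevant positions are < l
  have key : ∀ bnd, (∀ p (hp : p < arr.length), bnd < arr[p]'hp → A.getD (arr[p]'hp) 0 ≤ x) →
      ∀ t, i < t → bnd < t → t < A.length → A.getD t 0 ≤ x := by
    intro bnd hb t ht1 ht2 ht3
    obtain ⟨r, hr1, hr2, hr3⟩ := rec_above A t ht3
    have hrmem : r ∈ arr := (hinv.2 r).mpr ⟨by omega, hr2⟩
    obtain ⟨p, hp, hpe⟩ := List.getElem_of_mem hrmem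
    have := hb p hp (by omega)
    rw [hpe] at this
    exact le_trans hr3 this
  by_cases hl : l < arr.length
  · simp only [if_pos hl]
    have hj : arr.getD l 0 = arr[l] := List.getD_eq_getElem _ _ hl
    set j := arr[l] with hjdef
    have hjmem : j ∈ arr := List.getElem_mem _
    obtain ⟨hjk, hjrec⟩ := (hinv.2 j).mp hjmem
    have hxj : x < A.getD j 0 := by
      have := hhigh l (le_refl _) hl
      rwa [List.getD_eq_getElem _ _ hl] at this
    rw [hj]
    refine (findR_found A x i A.length j (by omega) hjrec.1 hxj ?_).symm
    intro t' h1 h2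
    refine key j ?_ t' (by omega) h1 h2
    intro p hp hgt
    have hplt : p < l := pos_lt A (i + 1) arr hinv p l hp hl hgt
    have := hlow p hplt
    rwa [List.getD_eq_getElem _ _ hp] at this
  · simp only [if_neg hl]
    refine (findR_none A x i A.length ?_).symm
    intro t h1 h2
    refine key 0 ?_ t h1 ?_ h2
    · intro p hp _
      have := hlow p (by omega)
      rwa [List.getD_eq_getElem _ _ hp] at this
    · omega

-- A's arr update preserves the invariant, moving the suffix start from i+1 to i
theorem step_arr (A : List Int) (i : Nat) (arr : List Nat)
    (hi : i < A.length) (hinv : RecInv A (i + 1) arr) :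
    RecInv A i (if arr = [] ∨ A.getD (arr.getLastD 0) 0 < A.getD i 0
                then arr ++ [i] else arr) := by
  split_ifs with hcond
  · constructor
    · rw [List.pairwise_append]
      refine ⟨hinv.1, List.pairwise_singleton _ _, ?_⟩
      intro a ha b hb
      simp only [List.mem_singleton] at hb
      subst hb
      have := ((hinv.2 a).mp ha).1
      omega
    · intro j
      rw [List.mem_append, List.mem_singleton]
      constructor
      · rintro (hj | hj)
        · obtain ⟨h1, h2⟩ := (hinv.2 j).mp hj
          exact ⟨by omega, h2⟩
        · rw [hj]
          refine ⟨le_refl _, hi, ?_⟩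
          intro t ht1 ht2
          by_contra hc
          push Not at hc
          obtain ⟨r, hr1, hr2, hr3⟩ := rec_above A t ht2
          have hrmem : r ∈ arr := (hinv.2 r).mpr ⟨by omega, hr2⟩
          rcases hcond with he | hlast
          · rw [he] at hrmem
            exact absurd hrmem (List.not_mem_nil)
          · have harrne : arr ≠ [] := List.ne_nil_of_mem hrmem
            obtain ⟨p, hp, hpe⟩ := List.getElem_of_mem hrmem
            have hmono := inv_mono A (i + 1) arr hinv p (arr.length - 1) (by omega) (by omega)
            rw [getLastD_eq arr harrne] at hlast
            rw [List.getD_eq_getElem _ _ hp, hpe] at hmono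
            have := lt_of_le_of_lt (le_trans hr3 hmono) hlast
            omega
      · rintro ⟨h1, h2⟩
        by_cases hji : j = i
        · right; exact hji
        · left; exact (hinv.2 j).mpr ⟨by omega, h2⟩
  · push Not at hcond
    obtain ⟨hne, hle⟩ := hcond
    constructor
    · exact hinv.1
    · intro j
      constructor
      · intro hj
        obtain ⟨h1, h2⟩ := (hinv.2 j).mp hj
        exact ⟨by omega, h2⟩
      · rintro ⟨h1, h2⟩
        by_cases hji : j = i
        · subst hji
          exfalso
          have hLmem : arr.getLastD 0 ∈ arr := by
            rw [getLastD_eq arr hne, List.getD_eq_getElem _ _ (by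
              cases arr with
              | nil => exact absurd rfl hne
              | cons a l => simp)]
            exact List.getElem_mem _
          obtain ⟨hk, hrec⟩ := (hinv.2 _).mp hLmem
          have := h2.2 (arr.getLastD 0) (by omega) hrec.1
          omega
        · exact (hinv.2 j).mpr ⟨by omega, h2⟩

-- the loop fills res below k with B's per-index values and leaves the rest alone
theorem loop_ok (A : List Int) : ∀ (k : Nat) (res : List Int) (arr : List Nat),
    k ≤ A.length → res.length = A.length → RecInv A k arr →
    (∀ idx, idx < k → res.getD idx 0 = -1) →
    (pvLoop A k (res, arr)).1
      = (List.range k).map (fun i => pvFindR A (A.getD i 0) i A.length) ++ res.drop k := by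
  intro k
  induction k with
  | zero => intro res arr _ _ _ _; simp [pvLoop]
  | succ k ih =>
    intro res arr hk hlen hinv hneg
    have hk' : k < A.length := by omega
    simp only [pvLoop]
    set l := pvBisect A arr (A.getD k 0) 0 arr.length with hl
    have hstep : pvStep A k (res, arr) =
        (if l < arr.length then res.set k ((arr.getD l 0 : Nat) : Int) else res,
         if arr = [] ∨ A.getD (arr.getLastD 0) 0 < A.getD k 0 then arr ++ [k] else arr) := rfl
    rw [hstep]
    have hinv' := step_arr A k arr hk' hinv
    set res' := if l < arr.length then res.set k ((arr.getD l 0 : Nat) : Int) else res with hres'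
    have hlen' : res'.length = A.length := by
      rw [hres']; split <;> simp [hlen]
    have hneg' : ∀ idx, idx < k → res'.getD idx 0 = -1 := by
      intro idx hidx
      rw [hres']
      split
      · rw [List.getD_eq_getElem?_getD, List.getElem?_set_ne (by omega),
          ← List.getD_eq_getElem?_getD]
        exact hneg idx (by omega)
      · exact hneg idx (by omega)
    rw [ih res' _ (by omega) hlen' hinv' hneg']
    rw [List.range_succ, List.map_append, List.append_assoc]
    congr 1
    have hres := step_res A k arr hk' hinv
    have hkres : k < res.length := by omega
    by_cases hcase : l < arr.length
    · rw [hres', if_pos hcase]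
      rw [List.drop_set]
      rw [if_neg (by omega)]
      rw [List.drop_eq_getElem_cons hkres]
      simp only [Nat.sub_self, List.set_cons_zero, List.map_cons, List.map_nil,
        List.cons_append, List.nil_append]
      rw [if_pos hcase] at hres
      rw [hres]
    · rw [hres', if_neg hcase]
      rw [List.drop_eq_getElem_cons hkres]
      simp only [List.map_cons, List.map_nil, List.cons_append, List.nil_append]
      rw [if_neg hcase] at hres
      have : res[k] = (-1 : Int) := by
        have := hneg k (by omega)
        rwa [List.getD_eq_getElem _ _ hkres] at this
      rw [this, hres]

-- ===== VERDICT (by name: the statement is the Claim_ definition above) =====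
theorem v3_adv_spec : Claim_equal_v3_adv := by
  intro A _
  unfold Spec_v3_adv v3_adv v3_adv_alt
  have hinv0 : RecInv A A.length [] := by
    constructor
    · exact List.Pairwise.nil
    · intro j
      constructor
      · intro h; exact absurd h (List.not_mem_nil)
      · rintro ⟨h1, h2, _⟩; omega
  rw [loop_ok A A.length _ _ (le_refl _) (by simp) hinv0
    (fun idx h => List.getD_replicate _ h)]
  simp
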